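-- pv_equiv track=rewrite | github.com/k-harada/AtCoder | typical90/036.py | solve
-- ===== SOURCE A (Python) =====
-- def solve(n, q, xy_list, q_list):
--
--     xy_list_add = [(x + y) for x, y in xy_list]
--     xy_list_sub = [(x - y) for x, y in xy_list]
--     xy_list_add_max = max(xy_list_add)
--     xy_list_add_min = min(xy_list_add)
--     xy_list_sub_max = max(xy_list_sub)
--     xy_list_sub_min = min(xy_list_sub)
--
--     res = []
--
--     for i in range(q):
--         q_i = q_list[i] - 1
--         r = max([
--             xy_list_add_max - xy_list_add[q_i], xy_list_add[q_i] - xy_list_add_min,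
--             xy_list_sub_max - xy_list_sub[q_i], xy_list_sub[q_i] - xy_list_sub_min
--         ])
--         res.append(r)
--
--     return res
-- ===== SOURCE B (Python) =====
-- def solve(n, q, xy_list, q_list):
--     res = []
--     for i in range(q):
--         px, py = xy_list[q_list[i] - 1]
--         res.append(max(abs(x - px) + abs(y - py) for x, y in xy_list))
--     return res
-- ===== Notes on version B (the rewrite author's own statement) =====
-- stated objective: alternative
-- what changed: B drops A's precomputation of the four Chebyshev extremes (max/min of x+y and x-y) and instead, for each query point, scans all points directly taking the maximum Manhattan distance; correctness rests on the identity |dx|+|dy| = max(|dx+dy|,|dx-dy|).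
import Mathlib
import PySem

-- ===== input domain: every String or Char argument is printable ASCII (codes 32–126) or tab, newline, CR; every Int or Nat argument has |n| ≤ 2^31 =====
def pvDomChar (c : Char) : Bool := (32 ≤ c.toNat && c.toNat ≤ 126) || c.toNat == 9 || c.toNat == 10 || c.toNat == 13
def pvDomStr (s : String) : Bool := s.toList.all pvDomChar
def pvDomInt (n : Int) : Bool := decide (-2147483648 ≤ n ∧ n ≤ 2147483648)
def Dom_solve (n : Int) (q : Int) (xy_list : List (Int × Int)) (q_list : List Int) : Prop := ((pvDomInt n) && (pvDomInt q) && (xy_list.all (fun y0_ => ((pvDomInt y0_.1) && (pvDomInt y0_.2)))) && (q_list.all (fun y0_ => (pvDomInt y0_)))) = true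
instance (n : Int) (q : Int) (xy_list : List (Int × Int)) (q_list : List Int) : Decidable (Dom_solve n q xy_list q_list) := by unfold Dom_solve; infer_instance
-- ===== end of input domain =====

-- B replaces A's four precomputed extremes of x+y and x-y by a direct per-query scan of all
-- points taking the maximum Manhattan distance (alternative decomposition, not faster).

-- ===== PORT A =====
def solve (n : Int) (q : Int) (xy_list : List (Int × Int)) (q_list : List Int) : List Int :=
  let xy_list_add := xy_list.map (fun p => p.1 + p.2)
  let xy_list_sub := xy_list.map (fun p => p.1 - p.2)
  match PySem.List.max? xy_list_add (fun v => v), PySem.List.min? xy_list_add (fun v => v),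
        PySem.List.max? xy_list_sub (fun v => v), PySem.List.min? xy_list_sub (fun v => v) with
  | some addMax, some addMin, some subMax, some subMin =>
      (PySem.List.pyRange 0 q 1).foldl (fun res i =>
        let q_i := PySem.List.pyGetD q_list i 0 - 1
        let ai := PySem.List.pyGetD xy_list_add q_i 0
        let si := PySem.List.pyGetD xy_list_sub q_i 0
        res ++ [max (max (max (addMax - ai) (ai - addMin)) (subMax - si)) (si - subMin)]) []
  | _, _, _, _ => []  -- Python raises ValueError on max([]); excluded by Pre_solve

-- ===== PORT B =====
def solve_alt (n : Int) (q : Int) (xy_list : List (Int × Int)) (q_list : List Int) : List Int :=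
  (PySem.List.pyRange 0 q 1).foldl (fun res i =>
    let p := PySem.List.pyGetD xy_list (PySem.List.pyGetD q_list i 0 - 1) (0, 0)
    let d := match PySem.List.max? (xy_list.map (fun r => |r.1 - p.1| + |r.2 - p.2|)) (fun v => v) with
             | some m => m
             | none => 0  -- Python raises ValueError on max of empty; excluded by Pre_solve
    res ++ [d]) []

-- ===== PRECONDITION & SPEC =====
-- Pre_ excludes exactly the inputs where Python A raises: an empty point list (max([]) is a
-- ValueError), a query count exceeding len(q_list) (IndexError), and a query value whose
-- index q_list[i]-1 falls outside Python's (negative-wrapping) range of xy_list (IndexError).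
def Pre_solve (n : Int) (q : Int) (xy_list : List (Int × Int)) (q_list : List Int) : Prop :=
  xy_list ≠ [] ∧ q ≤ (q_list.length : Int) ∧
  ∀ k ∈ q_list.take q.toNat, -(xy_list.length : Int) ≤ k - 1 ∧ k - 1 < (xy_list.length : Int)
instance (n : Int) (q : Int) (xy_list : List (Int × Int)) (q_list : List Int) : Decidable (Pre_solve n q xy_list q_list) := by unfold Pre_solve; infer_instance

def pvWitness_solve : Int × Int × (List (Int × Int)) × List Int := (0, 1, [(0, 0)], [1])

def Spec_solve (n : Int) (q : Int) (xy_list : List (Int × Int)) (q_list : List Int) (out : List Int) : Prop := out = solve_alt n q xy_list q_list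
instance (n : Int) (q : Int) (xy_list : List (Int × Int)) (q_list : List Int) (out : List Int) : Decidable (Spec_solve n q xy_list q_list out) := by unfold Spec_solve; infer_instance

-- ===== CLAIM (what is proved, stated in full; the proofs are below) =====
def Claim_equal_solve : Prop := ∀ (n : Int) (q : Int) (xy_list : List (Int × Int)) (q_list : List Int), Dom_solve n q xy_list q_list → Pre_solve n q xy_list q_list → Spec_solve n q xy_list q_list (solve n q xy_list q_list)

-- ===== LEMMAS AND PROOFS =====

-- |dx| + |dy| ≤ m gives all four signed Chebyshev differences ≤ m
lemma cheb_le (a b u v m : Int) (h : |a - u| + |b - v| ≤ m) :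
    (a + b) - (u + v) ≤ m ∧ (u + v) - (a + b) ≤ m ∧ (a - b) - (u - v) ≤ m ∧ (u - v) - (a - b) ≤ m := by
  rcases abs_cases (a - u) with ⟨h1, _⟩ | ⟨h1, _⟩ <;>
    rcases abs_cases (b - v) with ⟨h2, _⟩ | ⟨h2, _⟩ <;> omega

-- Manhattan distance bounded by the four-extremes expression
lemma cheb_ge (a b u v aM am sM sm : Int)
    (h1 : a + b ≤ aM) (h2 : am ≤ a + b) (h3 : a - b ≤ sM) (h4 : sm ≤ a - b) :
    |a - u| + |b - v| ≤ max (max (max (aM - (u + v)) ((u + v) - am)) (sM - (u - v))) ((u - v) - sm) := by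
  rcases abs_cases (a - u) with ⟨e1, _⟩ | ⟨e1, _⟩ <;>
    rcases abs_cases (b - v) with ⟨e2, _⟩ | ⟨e2, _⟩ <;> omega

-- the per-query equality: four-extremes formula = max Manhattan distance over the points
lemma key_eq (xy : List (Int × Int)) (p : Int × Int) (hp : p ∈ xy)
    (aM am sM sm : Int)
    (hAM : PySem.List.max? (xy.map (fun r => r.1 + r.2)) (fun v => v) = some aM)
    (ham : PySem.List.min? (xy.map (fun r => r.1 + r.2)) (fun v => v) = some am)
    (hSM : PySem.List.max? (xy.map (fun r => r.1 - r.2)) (fun v => v) = some sM)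
    (hsm : PySem.List.min? (xy.map (fun r => r.1 - r.2)) (fun v => v) = some sm) :
    max (max (max (aM - (p.1 + p.2)) ((p.1 + p.2) - am)) (sM - (p.1 - p.2))) ((p.1 - p.2) - sm)
      = (match PySem.List.max? (xy.map (fun r => |r.1 - p.1| + |r.2 - p.2|)) (fun v => v) with
         | some m => m
         | none => 0) := by
  rcases hm : PySem.List.max? (xy.map (fun r => |r.1 - p.1| + |r.2 - p.2|)) (fun v => v) with _ | m
  · rw [PySem.List.max?_eq_none_iff] at hm
    simp [List.map_eq_nil_iff] at hm
    exact absurd hm (List.ne_nil_of_mem hp)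
  · simp only [hm]
    have hmmem := PySem.List.max?_mem hm
    have hmmax := PySem.List.max?_isMax hm
    obtain ⟨r, hr, hrm⟩ := List.mem_map.mp hmmem
    apply le_antisymm
    · -- each of the four terms is ≤ some Manhattan distance ≤ m
      obtain ⟨e1, he1, he1v⟩ := List.mem_map.mp (PySem.List.max?_mem hAM)
      obtain ⟨e2, he2, he2v⟩ := List.mem_map.mp (PySem.List.min?_mem ham)
      obtain ⟨e3, he3, he3v⟩ := List.mem_map.mp (PySem.List.max?_mem hSM)
      obtain ⟨e4, he4, he4v⟩ := List.mem_map.mp (PySem.List.min?_mem hsm)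
      have d1 := hmmax _ (List.mem_map_of_mem he1)
      have d2 := hmmax _ (List.mem_map_of_mem he2)
      have d3 := hmmax _ (List.mem_map_of_mem he3)
      have d4 := hmmax _ (List.mem_map_of_mem he4)
      have c1 := cheb_le e1.1 e1.2 p.1 p.2 m d1
      have c2 := cheb_le e2.1 e2.2 p.1 p.2 m d2
      have c3 := cheb_le e3.1 e3.2 p.1 p.2 m d3
      have c4 := cheb_le e4.1 e4.2 p.1 p.2 m d4
      simp only at he1v he2v he3v he4v d1 d2 d3 d4
      omega
    · -- m is some Manhattan distance, bounded by the four-extremes expression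
      have b1 := PySem.List.max?_isMax hAM _ (List.mem_map_of_mem hr)
      have b2 := PySem.List.min?_isMin ham _ (List.mem_map_of_mem hr)
      have b3 := PySem.List.max?_isMax hSM _ (List.mem_map_of_mem hr)
      have b4 := PySem.List.min?_isMin hsm _ (List.mem_map_of_mem hr)
      simp only at b1 b2 b3 b4
      have := cheb_ge r.1 r.2 p.1 p.2 aM am sM sm b1 b2 b3 b4
      omega

-- ===== VERDICT (by name: the statement is the Claim_ definition above) =====
theorem solve_spec : Claim_equal_solve := by
  intro n q xy_list q_list _ hpre
  obtain ⟨hne, hql, hidx⟩ := hpre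
  unfold Spec_solve solve solve_alt
  simp only
  rcases hAM : PySem.List.max? (xy_list.map (fun p => p.1 + p.2)) (fun v => v) with _ | aM
  · rw [PySem.List.max?_eq_none_iff] at hAM
    simp [List.map_eq_nil_iff] at hAM
    exact absurd hAM hne
  rcases ham : PySem.List.min? (xy_list.map (fun p => p.1 + p.2)) (fun v => v) with _ | am
  · rw [PySem.List.min?_eq_none_iff] at ham
    simp [List.map_eq_nil_iff] at ham
    exact absurd ham hne
  rcases hSM : PySem.List.max? (xy_list.map (fun p => p.1 - p.2)) (fun v => v) with _ | sM
  · rw [PySem.List.max?_eq_none_iff] at hSM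
    simp [List.map_eq_nil_iff] at hSM
    exact absurd hSM hne
  rcases hsm : PySem.List.min? (xy_list.map (fun p => p.1 - p.2)) (fun v => v) with _ | sm
  · rw [PySem.List.min?_eq_none_iff] at hsm
    simp [List.map_eq_nil_iff] at hsm
    exact absurd hsm hne
  rw [hAM, ham, hSM, hsm]
  apply PySem.List.foldl_congr_mem
  intro acc i hi
  obtain ⟨hi0, hiq⟩ := PySem.List.mem_pyRange_one.mp hi
  -- the query value k = q_list[i]
  set k := PySem.List.pyGetD q_list i 0 with hk
  have hkmem : k ∈ q_list.take q.toNat := by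
    have hlt : i < (q_list.length : Int) := lt_of_lt_of_le hiq hql
    have : k = q_list[i.toNat]'(by omega) := by
      rw [hk, PySem.List.pyGetD_eq_getElem q_list 0 hi0 hlt]
    rw [this]
    have hti : i.toNat < (q_list.take q.toNat).length := by
      simp [List.length_take]; omega
    have := List.getElem_mem hti
    simpa [List.getElem_take] using this
  have hrange := hidx k hkmem
  have hin : PySem.Raise.InRange xy_list.length (k - 1) := by
    simp [PySem.Raise.InRange]; omega
  set p := PySem.List.pyGetD xy_list (k - 1) (0, 0) with hp
  have hpmem : p ∈ xy_list := PySem.List.pyGetD_mem xy_list (0, 0) hin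
  have hai : PySem.List.pyGetD (xy_list.map (fun r => r.1 + r.2)) (k - 1) 0 = p.1 + p.2 := by
    have := PySem.List.pyGetD_map (fun r : Int × Int => r.1 + r.2) xy_list (k - 1) (0, 0)
    simpa using this
  have hsi : PySem.List.pyGetD (xy_list.map (fun r => r.1 - r.2)) (k - 1) 0 = p.1 - p.2 := by
    have := PySem.List.pyGetD_map (fun r : Int × Int => r.1 - r.2) xy_list (k - 1) (0, 0)
    simpa using this
  rw [hai, hsi, key_eq xy_list p hpmem aM am sM sm hAM ham hSM hsm]
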